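-- pv_equiv track=rewrite | github.com/grupy-sanca/dojos | 027/ex1.py | dancing_string
-- ===== SOURCE A (Python) =====
-- def dancing_string(sentence):
--     response = ''
--
--     dancing_flag = True
--
--     for letter in sentence:
--         if letter.isalpha():
--             response += letter.upper() if dancing_flag else letter.lower()
--             dancing_flag = not dancing_flag
--         else:
--             response += ' '
--
--     return response
-- ===== SOURCE B (Python) =====
-- def _case_run(run, start_upper):
--     u = run.upper()
--     l = run.lower()
--     first, second = (u, l) if start_upper else (l, u)
--     return ''.join((first if j % 2 == 0 else second)[j] for j in range(len(run)))
--
-- def dancing_string(sentence):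
--     n = len(sentence)
--     parts = []
--     letters = 0
--     i = 0
--     while i < n:
--         j = i + 1
--         if sentence[i].isalpha():
--             while j < n and sentence[j].isalpha():
--                 j += 1
--             parts.append(_case_run(sentence[i:j], letters % 2 == 0))
--             letters += j - i
--         else:
--             while j < n and not sentence[j].isalpha():
--                 j += 1
--             parts.append(' ' * (j - i))
--         i = j
--     return ''.join(parts)
-- ===== Notes on version B (the rewrite author's own statement) =====
-- stated objective: alternative
-- what changed: Replaces A's per-character loop with a toggling case flag by a run decomposition: split the sentence into maximal alpha/non-alpha runs, case each alpha run at once by selecting each position from the run's whole upper() or lower() image by index parity (offset by the letters emitted so far), and map each non-alpha run to a space block.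
import Mathlib
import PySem

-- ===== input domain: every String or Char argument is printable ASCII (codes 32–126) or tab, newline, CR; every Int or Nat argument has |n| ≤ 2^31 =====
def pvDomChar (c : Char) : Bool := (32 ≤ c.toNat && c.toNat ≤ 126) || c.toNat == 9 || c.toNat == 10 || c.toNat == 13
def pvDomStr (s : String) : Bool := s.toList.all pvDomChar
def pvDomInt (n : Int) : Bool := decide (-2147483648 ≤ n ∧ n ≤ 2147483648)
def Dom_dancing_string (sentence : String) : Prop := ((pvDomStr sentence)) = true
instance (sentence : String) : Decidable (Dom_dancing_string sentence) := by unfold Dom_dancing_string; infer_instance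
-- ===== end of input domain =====

-- B replaces A's per-character toggling-flag loop by a run decomposition: split the sentence
-- into maximal alpha / non-alpha runs, case each alpha run at once from its whole-run upper()
-- and lower() images selected by index parity, and map non-alpha runs to space blocks
-- (objective: alternative).

-- ===== PORT A =====
-- for letter in sentence: accumulate (response, dancing_flag)
def dancing_string (sentence : String) : String :=
  (sentence.toList.foldl
    (fun (st : String × Bool) letter =>
      if PySem.Chars.isalpha letter then
        (st.1.push (if st.2 then PySem.Chars.upperChar letter else PySem.Chars.lowerChar letter), !st.2)
      else
        (st.1.push ' ', st.2))
    ("", true)).1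

-- ===== PORT B =====
-- _case_run: pick each position from run.upper() or run.lower() by index parity
-- (the Python indexing (…)[j] always has j < len(run); getD ' ' is exact there)
def pvCaseRun (run : List Char) (startUpper : Bool) : List Char :=
  let u := PySem.Chars.upper run
  let l := PySem.Chars.lower run
  let first := if startUpper then u else l
  let second := if startUpper then l else u
  (List.range run.length).map (fun j => (if j % 2 == 0 then first else second).getD j ' ')

-- the while-loop over maximal runs; `letters` counts letters emitted so far
def pvRuns : List Char → Nat → List Char
  | [], _ => []
  | c :: rest, letters =>
    if PySem.Chars.isalpha c then
      let run := c :: rest.takeWhile PySem.Chars.isalpha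
      pvCaseRun run (letters % 2 == 0) ++
        pvRuns (rest.dropWhile PySem.Chars.isalpha) (letters + run.length)
    else
      let run := c :: rest.takeWhile (fun d => !PySem.Chars.isalpha d)
      List.replicate run.length ' ' ++
        pvRuns (rest.dropWhile (fun d => !PySem.Chars.isalpha d)) letters
termination_by cs _ => cs.length
decreasing_by
  · exact Nat.lt_succ_of_le (List.length_dropWhile_le _ _)
  · exact Nat.lt_succ_of_le (List.length_dropWhile_le _ _)

def dancing_string_alt (sentence : String) : String :=
  String.ofList (pvRuns sentence.toList 0)

-- ===== PRECONDITION & SPEC =====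
def Spec_dancing_string (sentence : String) (out : String) : Prop := out = dancing_string_alt sentence
instance (sentence : String) (out : String) : Decidable (Spec_dancing_string sentence out) := by unfold Spec_dancing_string; infer_instance

-- ===== CLAIM (what is proved, stated in full; the proofs are below) =====
def Claim_equal_dancing_string : Prop := ∀ (sentence : String), Dom_dancing_string sentence → Spec_dancing_string sentence (dancing_string sentence)

-- ===== LEMMAS AND PROOFS =====

-- A's loop body, named for the proofs
def pvStep (st : String × Bool) (letter : Char) : String × Bool :=
  if PySem.Chars.isalpha letter then
    (st.1.push (if st.2 then PySem.Chars.upperChar letter else PySem.Chars.lowerChar letter), !st.2)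
  else
    (st.1.push ' ', st.2)

-- alternating-case reference form
def pvAlt : Bool → List Char → List Char
  | _, [] => []
  | flag, c :: cs =>
    (if flag then PySem.Chars.upperChar c else PySem.Chars.lowerChar c) :: pvAlt (!flag) cs

lemma pvPushAppend (r : String) (x : Char) (l : List Char) :
    r.push x ++ String.ofList l = r ++ String.ofList (x :: l) := by
  have h1 : r.push x = r ++ String.ofList [x] := (String.append_left_inj r).mp rfl
  rw [h1, String.append_assoc, ← String.ofList_append]
  rfl

lemma pvPar (j : Nat) : ((j + 1) % 2 == 0) = !(j % 2 == 0) := by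
  rcases Nat.mod_two_eq_zero_or_one j with h | h <;>
    simp [h, show (j + 1) % 2 = 1 - j % 2 by omega]

lemma pvFlagAdd (a k : Nat) :
    (if k % 2 == 0 then ((a % 2 == 0) : Bool) else !(a % 2 == 0)) = ((a + k) % 2 == 0) := by
  rcases Nat.mod_two_eq_zero_or_one k with h | h <;> rcases Nat.mod_two_eq_zero_or_one a with h2 | h2 <;>
    simp [h, h2, show (a + k) % 2 = (a % 2 + k % 2) % 2 by omega]

lemma pvCaseRun_eq (run : List Char) : ∀ (su : Bool), pvCaseRun run su = pvAlt su run := by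
  induction run with
  | nil => intro su; simp [pvCaseRun, pvAlt]
  | cons c cs ih =>
    intro su
    simp only [pvAlt]
    rw [← ih (!su)]
    simp only [pvCaseRun, List.length_cons, List.range_succ_eq_map, List.map_cons,
      List.map_map, PySem.Chars.upper, PySem.Chars.lower]
    congr 1
    · cases su <;> simp
    · apply List.map_congr_left
      intro j hj
      simp only [Function.comp, pvPar j]
      cases su <;> cases h : (j % 2 == 0) <;> simp

lemma pvRunFold (run : List Char) (h : ∀ c ∈ run, PySem.Chars.isalpha c = true) :
    ∀ (flag : Bool) (r : String),
    run.foldl pvStep (r, flag) =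
      (r ++ String.ofList (pvAlt flag run), if run.length % 2 == 0 then flag else !flag) := by
  induction run with
  | nil => intro flag r; simp [pvAlt]
  | cons c cs ih =>
    intro flag r
    have hc : PySem.Chars.isalpha c = true := h c (by simp)
    have hrest : ∀ x ∈ cs, PySem.Chars.isalpha x = true := fun x hx => h x (by simp [hx])
    rw [List.foldl_cons]
    simp only [pvStep, hc, if_pos]
    rw [ih hrest]
    simp only [Prod.mk.injEq]
    refine ⟨by rw [pvPushAppend]; rfl, ?_⟩
    rw [show ((c :: cs).length % 2 == 0) = !(cs.length % 2 == 0) by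
      simpa [List.length_cons] using pvPar cs.length]
    cases h2 : (cs.length % 2 == 0) <;> simp

lemma pvSpaceFold (run : List Char) (h : ∀ c ∈ run, PySem.Chars.isalpha c = false) :
    ∀ (flag : Bool) (r : String),
    run.foldl pvStep (r, flag) = (r ++ String.ofList (List.replicate run.length ' '), flag) := by
  induction run with
  | nil => intro flag r; simp
  | cons c cs ih =>
    intro flag r
    have hc : PySem.Chars.isalpha c = false := h c (by simp)
    have hrest : ∀ x ∈ cs, PySem.Chars.isalpha x = false := fun x hx => h x (by simp [hx])
    rw [List.foldl_cons]
    simp only [pvStep, hc, Bool.false_eq_true, if_false]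
    rw [ih hrest]
    rw [show (c :: cs).length = cs.length + 1 from rfl, List.replicate_succ, pvPushAppend]

lemma pvRuns_alpha (c : Char) (rest : List Char) (letters : Nat)
    (h : PySem.Chars.isalpha c = true) :
    pvRuns (c :: rest) letters =
      pvCaseRun (c :: rest.takeWhile PySem.Chars.isalpha) (letters % 2 == 0) ++
        pvRuns (rest.dropWhile PySem.Chars.isalpha)
          (letters + (c :: rest.takeWhile PySem.Chars.isalpha).length) := by
  rw [pvRuns.eq_def]; simp [h]

lemma pvRuns_nonalpha (c : Char) (rest : List Char) (letters : Nat)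
    (h : PySem.Chars.isalpha c = false) :
    pvRuns (c :: rest) letters =
      List.replicate (c :: rest.takeWhile (fun d => !PySem.Chars.isalpha d)).length ' ' ++
        pvRuns (rest.dropWhile (fun d => !PySem.Chars.isalpha d)) letters := by
  rw [pvRuns.eq_def]; simp [h]

lemma pvMainAux : ∀ (n : Nat) (cs : List Char), cs.length ≤ n → ∀ (letters : Nat) (r : String),
    (cs.foldl pvStep (r, letters % 2 == 0)).1 = r ++ String.ofList (pvRuns cs letters) := by
  intro n
  induction n with
  | zero =>
    intro cs hlen letters r
    have hnil : cs = [] := List.length_eq_zero_iff.mp (Nat.le_zero.mp hlen)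
    subst hnil; simp [pvRuns]
  | succ n ihn =>
    intro cs hlen letters r
    match cs with
    | [] => simp [pvRuns]
    | c :: rest =>
      by_cases hc : PySem.Chars.isalpha c = true
      · have hsplit : c :: rest =
            (c :: rest.takeWhile PySem.Chars.isalpha) ++ rest.dropWhile PySem.Chars.isalpha := by
          simp [List.takeWhile_append_dropWhile]
        have hall : ∀ x ∈ c :: rest.takeWhile PySem.Chars.isalpha,
            PySem.Chars.isalpha x = true := by
          intro x hx
          rcases List.mem_cons.mp hx with h | h
          · exact h ▸ hc
          · exact List.mem_takeWhile_imp h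
        have hdrop : (rest.dropWhile PySem.Chars.isalpha).length ≤ n := by
          have h1 := List.length_dropWhile_le PySem.Chars.isalpha rest
          simp only [List.length_cons] at hlen
          omega
        conv_lhs => rw [hsplit]
        rw [List.foldl_append, pvRunFold _ hall, pvFlagAdd, ihn _ hdrop,
          pvRuns_alpha c rest letters hc, pvCaseRun_eq,
          String.ofList_append, ← String.append_assoc]
      · have hc' : PySem.Chars.isalpha c = false := by simpa using hc
        have hsplit : c :: rest =
            (c :: rest.takeWhile (fun d => !PySem.Chars.isalpha d)) ++
              rest.dropWhile (fun d => !PySem.Chars.isalpha d) := by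
          simp [List.takeWhile_append_dropWhile]
        have hall : ∀ x ∈ c :: rest.takeWhile (fun d => !PySem.Chars.isalpha d),
            PySem.Chars.isalpha x = false := by
          intro x hx
          rcases List.mem_cons.mp hx with h | h
          · exact h ▸ hc'
          · simpa using List.mem_takeWhile_imp h
        have hdrop : (rest.dropWhile (fun d => !PySem.Chars.isalpha d)).length ≤ n := by
          have h1 := List.length_dropWhile_le (fun d => !PySem.Chars.isalpha d) rest
          simp only [List.length_cons] at hlen
          omega
        conv_lhs => rw [hsplit]
        rw [List.foldl_append, pvSpaceFold _ hall, ihn _ hdrop,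
          pvRuns_nonalpha c rest letters hc',
          String.ofList_append, ← String.append_assoc]

lemma pvMain (cs : List Char) (letters : Nat) (r : String) :
    (cs.foldl pvStep (r, letters % 2 == 0)).1 = r ++ String.ofList (pvRuns cs letters) :=
  pvMainAux cs.length cs le_rfl letters r

theorem dancing_string_spec : Claim_equal_dancing_string := by
  intro s _
  show dancing_string s = dancing_string_alt s
  have := pvMain s.toList 0 ""
  simpa [dancing_string, dancing_string_alt, pvStep] using this
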